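-- pv_equiv track=rewrite | github.com/baletiballo/DL-HW-4 | Formula.py | __em_formula_str
-- ===== SOURCE A (Python) =====
-- def __em_formula_str(n: int) -> str:
--     if n == 0:
--         return "p0"
--     else:
--         n = n-1  # we return phi_{n+1}, reducing n now keeps the indices from the Ex. sheet
--         phi_n = __em_formula_str(n)
--         box_n = "□ " * n
--         big_and = ""
--         for j in range(1, n+1):
--             big_and = big_and + f" ∧ ( ( q{j} → □ q{j} ) ∧ ( ¬ q{j} → □ ¬ q{j} ) ) ) ) "
--         return f"{phi_n} ∧ { box_n } ( p{n} → ( ♢ ( p{n + 1} ∧ q{n + 1} ) ∧ ♢ ( p{n + 1} ∧ ¬ q{n + 1} ) {big_and}"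
-- ===== SOURCE B (Python) =====
-- def __em_formula_str(n: int) -> str:
--     # Iterative accumulation instead of recursion: append each level's suffix in a loop.
--     if n < 0:
--         raise ValueError("n must be nonnegative")
--     result = "p0"
--     for N in range(1, n + 1):
--         k = N - 1
--         box = "□ " * k
--         big_and = "".join(f" ∧ ( ( q{j} → □ q{j} ) ∧ ( ¬ q{j} → □ ¬ q{j} ) ) ) ) " for j in range(1, k + 1))
--         result = f"{result} ∧ { box } ( p{k} → ( ♢ ( p{k + 1} ∧ q{k + 1} ) ∧ ♢ ( p{k + 1} ∧ ¬ q{k + 1} ) {big_and}"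
--     return result
-- ===== Notes on version B (the rewrite author's own statement) =====
-- stated objective: alternative
-- what changed: Replaces A's self-recursion (and its inner string-concatenation loop) with a single iterative loop that starts from the base formula and appends each level's suffix, building the inner conjunction with a ''.join over a generator; like A, B raises for negative n (ValueError instead of A's RecursionError).
import Mathlib
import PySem

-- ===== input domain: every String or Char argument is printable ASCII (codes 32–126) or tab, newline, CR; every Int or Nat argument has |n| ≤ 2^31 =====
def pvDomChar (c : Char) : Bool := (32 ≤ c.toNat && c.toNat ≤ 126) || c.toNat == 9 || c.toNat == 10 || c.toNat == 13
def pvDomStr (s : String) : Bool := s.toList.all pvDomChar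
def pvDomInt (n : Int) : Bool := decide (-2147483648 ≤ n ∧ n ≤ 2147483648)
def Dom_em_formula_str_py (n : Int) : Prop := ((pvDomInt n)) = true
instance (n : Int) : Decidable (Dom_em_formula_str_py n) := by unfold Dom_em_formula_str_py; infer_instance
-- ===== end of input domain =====

-- B replaces A's recursion with an iterative loop appending each level's suffix; equal output for n ≥ 0 (both raise for n < 0).

-- ===== PORT A =====
-- recursion on the Nat value of n; Python A recurses on n-1 until n == 0
def em_formula_str_py_go : Nat → String
  | 0 => "p0"
  | Nat.succ m =>
      let n : Int := (m : Int)                       -- "n = n-1"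
      let phi_n := em_formula_str_py_go m
      let box_n := String.ofList (PySem.List.pyRepeat "□ ".toList n)
      let big_and := (PySem.List.pyRange 1 (n + 1) 1).foldl
        (fun acc j => acc ++ (" ∧ ( ( q" ++ PySem.Int.toStr j ++ " → □ q" ++ PySem.Int.toStr j ++
          " ) ∧ ( ¬ q" ++ PySem.Int.toStr j ++ " → □ ¬ q" ++ PySem.Int.toStr j ++ " ) ) ) ) ")) ""
      phi_n ++ (" ∧ " ++ box_n ++ " ( p" ++ PySem.Int.toStr n ++ " → ( ♢ ( p" ++ PySem.Int.toStr (n + 1) ++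
        " ∧ q" ++ PySem.Int.toStr (n + 1) ++ " ) ∧ ♢ ( p" ++ PySem.Int.toStr (n + 1) ++
        " ∧ ¬ q" ++ PySem.Int.toStr (n + 1) ++ " ) " ++ big_and)

-- for n < 0 the Python recursion never reaches the base case (RecursionError); excluded by Pre_
def em_formula_str_py (n : Int) : String := em_formula_str_py_go n.toNat

-- ===== PORT B =====
def pvTermB (j : Int) : String :=
  " ∧ ( ( q" ++ PySem.Int.toStr j ++ " → □ q" ++ PySem.Int.toStr j ++
  " ) ∧ ( ¬ q" ++ PySem.Int.toStr j ++ " → □ ¬ q" ++ PySem.Int.toStr j ++ " ) ) ) ) "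

-- for n < 0 Python B raises ValueError (excluded by Pre_); the guard contributes no value there
def em_formula_str_py_alt (n : Int) : String :=
  (PySem.List.pyRange 1 (n + 1) 1).foldl
    (fun result N =>
      let k := N - 1
      let box := String.ofList (PySem.List.pyRepeat "□ ".toList k)
      let big_and := PySem.Str.join "" ((PySem.List.pyRange 1 (k + 1) 1).map pvTermB)
      result ++ (" ∧ " ++ box ++ " ( p" ++ PySem.Int.toStr k ++ " → ( ♢ ( p" ++ PySem.Int.toStr (k + 1) ++
        " ∧ q" ++ PySem.Int.toStr (k + 1) ++ " ) ∧ ♢ ( p" ++ PySem.Int.toStr (k + 1) ++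
        " ∧ ¬ q" ++ PySem.Int.toStr (k + 1) ++ " ) " ++ big_and))
    "p0"

-- ===== PRECONDITION & SPEC =====
-- Pre_ excludes n < 0, on which Python A raises RecursionError (and B raises ValueError): no return value
def Pre_em_formula_str_py (n : Int) : Prop := 0 ≤ n
instance (n : Int) : Decidable (Pre_em_formula_str_py n) := by unfold Pre_em_formula_str_py; infer_instance
def pvWitness_em_formula_str_py : Int := 3

def Spec_em_formula_str_py (n : Int) (out : String) : Prop := out = em_formula_str_py_alt n
instance (n : Int) (out : String) : Decidable (Spec_em_formula_str_py n out) := by unfold Spec_em_formula_str_py; infer_instance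

-- ===== CLAIM (what is proved, stated in full; the proofs are below) =====
def Claim_equal_em_formula_str_py : Prop := ∀ (n : Int), Dom_em_formula_str_py n → Pre_em_formula_str_py n → Spec_em_formula_str_py n (em_formula_str_py n)

-- ===== LEMMAS AND PROOFS =====
lemma pvCharsJoin_nil_cons (a : List Char) (l : List (List Char)) :
    PySem.Chars.join [] (a :: l) = a ++ PySem.Chars.join [] l := by
  cases l with
  | nil => simp [PySem.Chars.join_singleton, PySem.Chars.join_nil]
  | cons b r => rw [PySem.Chars.join_cons_cons]; simp

lemma pvStrJoin_nil : PySem.Str.join "" ([] : List String) = "" := rfl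

lemma pvStrJoin_cons (p : String) (rest : List String) :
    PySem.Str.join "" (p :: rest) = p ++ PySem.Str.join "" rest := by
  unfold PySem.Str.join
  simp only [List.map_cons]
  rw [show ("" : String).toList = [] from rfl, pvCharsJoin_nil_cons,
    String.ofList_append, String.ofList_toList]

lemma pvFoldl_append_eq_join (f : Int → String) :
    ∀ (l : List Int) (acc : String),
      l.foldl (fun a j => a ++ f j) acc = acc ++ PySem.Str.join "" (l.map f) := by
  intro l
  induction l with
  | nil => intro acc; simp [pvStrJoin_nil]
  | cons x xs ih =>
      intro acc
      simp only [List.foldl_cons, List.map_cons]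
      rw [ih, pvStrJoin_cons, String.append_assoc]

lemma pvGo_eq_alt : ∀ (m : Nat), em_formula_str_py_go m = em_formula_str_py_alt (m : Int) := by
  intro m
  induction m with
  | zero =>
      simp [em_formula_str_py_go, em_formula_str_py_alt, PySem.List.pyRange_one_eq_nil]
  | succ m ih =>
      unfold em_formula_str_py_alt
      rw [show ((m + 1 : Nat) : Int) + 1 = ((m : Int) + 1) + 1 by push_cast; ring,
        PySem.List.pyRange_one_succ_right (by omega : (1 : Int) ≤ (m : Int) + 1),
        List.foldl_append]
      rw [← em_formula_str_py_alt]
      show em_formula_str_py_go (m + 1) = _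
      unfold em_formula_str_py_go
      rw [ih]
      simp only [List.foldl_cons, List.foldl_nil]
      rw [pvFoldl_append_eq_join]
      have hk : ((m : Int) + 1) - 1 = (m : Int) := by ring
      rw [hk, String.empty_append]
      rfl

-- ===== VERDICT (by name: the statement is the Claim_ definition above) =====
theorem em_formula_str_py_spec : Claim_equal_em_formula_str_py := by
  intro n _ hpre
  show em_formula_str_py n = em_formula_str_py_alt n
  have h : ((n.toNat : Int)) = n := Int.toNat_of_nonneg hpre
  rw [em_formula_str_py, pvGo_eq_alt, h]
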